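-- pv_equiv track=rewrite | github.com/stoppie/data_science | US_births/Basics.py | month_births
-- ===== SOURCE A (Python) =====
-- def month_births(births_list):
--     births_per_month = {}
--
--     for item in births_list:
--         month = item[1]
--         births = item[4]
--
--         if month in births_per_month:
--             births_per_month[month] = births_per_month[month] + births
--         else:
--             births_per_month[month] = births
--
--     return births_per_month
-- ===== SOURCE B (Python) =====
-- def month_births(births_list):
--     months = list(dict.fromkeys(row[1] for row in births_list))
--     return {m: sum(row[4] for row in births_list if row[1] == m) for m in months}
-- ===== Notes on version B (the rewrite author's own statement) =====
-- stated objective: alternative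
-- what changed: Replaces the single conditional-accumulation pass over a dict with a two-phase group-by: first collect the distinct months in first-occurrence order via dict.fromkeys, then build the result with a dict comprehension that sums item[4] over a filtered scan per month.
import Mathlib
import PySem

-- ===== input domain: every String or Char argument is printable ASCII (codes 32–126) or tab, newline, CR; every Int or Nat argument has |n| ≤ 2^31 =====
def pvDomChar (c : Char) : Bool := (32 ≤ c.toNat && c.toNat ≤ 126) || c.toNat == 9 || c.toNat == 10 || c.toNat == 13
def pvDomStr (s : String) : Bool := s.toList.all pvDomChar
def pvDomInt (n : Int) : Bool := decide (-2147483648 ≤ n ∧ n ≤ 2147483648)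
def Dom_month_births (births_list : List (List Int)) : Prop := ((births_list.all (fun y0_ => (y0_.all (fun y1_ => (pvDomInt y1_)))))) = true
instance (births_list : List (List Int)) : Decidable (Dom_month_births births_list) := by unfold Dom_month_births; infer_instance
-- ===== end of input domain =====

-- B groups by a two-phase scan (distinct months in first-occurrence order, then a filtered sum per month)
-- instead of A's single conditional-accumulation pass. Equivalence is about the returned dict (as an items list).

-- ===== PORT A =====
def month_births (births_list : List (List Int)) : List (Int × Int) :=
  (births_list.foldl (fun births_per_month item =>
      let month := PySem.List.pyGetD item 1 0
      let births := PySem.List.pyGetD item 4 0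
      if births_per_month.contains month then
        births_per_month.insert month (births_per_month.getD month 0 + births)
      else
        births_per_month.insert month births)
    (PySem.Dict.empty : PySem.Dict Int Int)).items

-- ===== PORT B =====
def month_births_alt (births_list : List (List Int)) : List (Int × Int) :=
  let months := PySem.List.dedup (births_list.map (fun row => PySem.List.pyGetD row 1 0))
  months.map (fun m =>
    (m, ((births_list.filter (fun row => PySem.List.pyGetD row 1 0 == m)).map
          (fun row => PySem.List.pyGetD row 4 0)).sum))

-- ===== PRECONDITION & SPEC =====
-- Pre_ excludes exactly the inputs on which Python A raises IndexError (a row shorter than 5, so item[1] or item[4] fails).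
def Pre_month_births (births_list : List (List Int)) : Prop :=
  ∀ row ∈ births_list, 5 ≤ row.length
instance (births_list : List (List Int)) : Decidable (Pre_month_births births_list) := by
  unfold Pre_month_births; infer_instance

def pvWitness_month_births : List (List Int) :=
  [[2000, 1, 1, 6, 9083], [2000, 1, 2, 7, 8006], [2000, 2, 1, 1, 11363]]

def Spec_month_births (births_list : List (List Int)) (out : List (Int × Int)) : Prop := out = month_births_alt births_list
instance (births_list : List (List Int)) (out : List (Int × Int)) : Decidable (Spec_month_births births_list out) := by unfold Spec_month_births; infer_instance

-- ===== CLAIM (what is proved, stated in full; the proofs are below) =====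
def Claim_equal_month_births : Prop := ∀ (births_list : List (List Int)), Dom_month_births births_list → Pre_month_births births_list → Spec_month_births births_list (month_births births_list)

-- ===== LEMMAS AND PROOFS =====

-- A's loop body, named for the proofs
def pvStepA (d : PySem.Dict Int Int) (item : List Int) : PySem.Dict Int Int :=
  let month := PySem.List.pyGetD item 1 0
  let births := PySem.List.pyGetD item 4 0
  if d.contains month then d.insert month (d.getD month 0 + births)
  else d.insert month births

-- A's step function, extensionally: both branches are the same insert (in the else branch the old value is 0)
lemma pvStepA_eq (d : PySem.Dict Int Int) (item : List Int) :
    pvStepA d item = d.insert (PySem.List.pyGetD item 1 0)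
      (d.getD (PySem.List.pyGetD item 1 0) 0 + PySem.List.pyGetD item 4 0) := by
  unfold pvStepA
  by_cases h : d.contains (PySem.List.pyGetD item 1 0)
  · simp [h]
  · simp only [Bool.not_eq_true] at h
    simp [h, PySem.Dict.getD_of_not_contains d 0 h]

-- running A's loop adds, at each key, the sum of the births of the rows with that month
lemma pvGetD_foldl (l : List (List Int)) (d : PySem.Dict Int Int) (v : Int) :
    (l.foldl pvStepA d).getD v 0
      = d.getD v 0 + ((l.filter (fun row => PySem.List.pyGetD row 1 0 == v)).map
          (fun row => PySem.List.pyGetD row 4 0)).sum := by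
  induction l generalizing d with
  | nil => simp
  | cons row t ih =>
    rw [List.foldl_cons, ih, pvStepA_eq]
    by_cases h : PySem.List.pyGetD row 1 0 = v
    · simp [h, PySem.Dict.getD_insert_self]
      ring
    · simp [h, PySem.Dict.getD_insert_of_ne _ _ _ (fun e => h e.symm)]

lemma pvStepA_funext :
    pvStepA = fun (d : PySem.Dict Int Int) (item : List Int) =>
      d.insert (PySem.List.pyGetD item 1 0)
        (d.getD (PySem.List.pyGetD item 1 0) 0 + PySem.List.pyGetD item 4 0) := by
  funext d item; exact pvStepA_eq d item

lemma pvKeys_foldl (l : List (List Int)) :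
    (l.foldl pvStepA PySem.Dict.empty).keys
      = PySem.List.dedup (l.map (fun row => PySem.List.pyGetD row 1 0)) := by
  rw [pvStepA_funext, PySem.Dict.keys_foldl_insert_key]
  rfl

lemma pvNodup_keys (l : List (List Int)) :
    (l.foldl pvStepA PySem.Dict.empty).keys.Nodup := by
  rw [pvStepA_funext]
  exact PySem.Dict.nodup_keys_foldl_insert_key _ _ _ _ PySem.Dict.nodup_keys_empty

-- ===== VERDICT (by name: the statement is the Claim_ definition above) =====
theorem month_births_spec : Claim_equal_month_births := by
  intro births_list _ _
  show month_births births_list = month_births_alt births_list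
  unfold month_births month_births_alt
  have hfold : ∀ (d : PySem.Dict Int Int),
      births_list.foldl (fun births_per_month item =>
        let month := PySem.List.pyGetD item 1 0
        let births := PySem.List.pyGetD item 4 0
        if births_per_month.contains month then
          births_per_month.insert month (births_per_month.getD month 0 + births)
        else births_per_month.insert month births) d
      = births_list.foldl pvStepA d := by
    intro d; rfl
  rw [hfold]
  rw [PySem.Dict.items_eq_map_keys _ (pvNodup_keys births_list) 0]
  rw [pvKeys_foldl]
  apply List.map_congr_left
  intro m _
  rw [pvGetD_foldl]
  simp [PySem.Dict.getD_empty]
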